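-- pv_equiv track=rewrite | github.com/Simon-Zbc/leetcode-ex | src/wc3436342.py | firstCompleteIndex
-- ===== SOURCE A (Python) =====
-- from typing import List
--
-- def firstCompleteIndex(arr: List[int], mat: List[List[int]]) -> int:
--     target = []
--     m, n = len(mat), len(mat[0])
--     for i in range(m):
--         target.append(mat[i])
--     for j in range(n):
--         l = []
--         for i in range(m):
--             l.append(mat[i][j])
--         target.append(l)
--     res = m * n - 1
--     # for i in range(m + n):
--     #     ans = 0
--     #     for j in range(len(target[i])):
--     #         ans = max(ans, arr.index(target[i][j]))
--     #     res = min(res, ans)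
--
--     for i in range(len(arr)):
--         for j in range(m + n):
--             if arr[i] in target[j]:
--                 target[j].remove(arr[i])
--                 if target[j] == []:
--                     return i
--     return res
-- ===== SOURCE B (Python) =====
-- from typing import List
--
-- # Per-list counting instead of repeated membership+remove over shared lists:
-- # for each row/column, a value->count dict of what it still needs is consumed
-- # along arr; the answer is the minimum completion index (return value only:
-- # unlike A, B does not mutate mat's rows).
-- def firstCompleteIndex(arr: List[int], mat: List[List[int]]) -> int:
--     m, n = len(mat), len(mat[0])
--     lists = list(mat) + [[mat[i][j] for i in range(m)] for j in range(n)]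
--     best = None
--     for l in lists:
--         need = {}
--         for v in l:
--             need[v] = need.get(v, 0) + 1
--         rem = len(l)
--         for i, v in enumerate(arr):
--             if need.get(v, 0) > 0:
--                 need[v] -= 1
--                 rem -= 1
--                 if rem == 0:
--                     if best is None or i < best:
--                         best = i
--                     break
--     return best if best is not None else m * n - 1
-- ===== Notes on version B (the rewrite author's own statement) =====
-- stated objective: faster
-- what changed: Instead of re-scanning and destructively removing from all m+n shared row/column lists at every arr step, B processes each row/column independently with a value->count dict consumed along arr, records its completion index, and returns the minimum; B also does not mutate mat.
import Mathlib
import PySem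

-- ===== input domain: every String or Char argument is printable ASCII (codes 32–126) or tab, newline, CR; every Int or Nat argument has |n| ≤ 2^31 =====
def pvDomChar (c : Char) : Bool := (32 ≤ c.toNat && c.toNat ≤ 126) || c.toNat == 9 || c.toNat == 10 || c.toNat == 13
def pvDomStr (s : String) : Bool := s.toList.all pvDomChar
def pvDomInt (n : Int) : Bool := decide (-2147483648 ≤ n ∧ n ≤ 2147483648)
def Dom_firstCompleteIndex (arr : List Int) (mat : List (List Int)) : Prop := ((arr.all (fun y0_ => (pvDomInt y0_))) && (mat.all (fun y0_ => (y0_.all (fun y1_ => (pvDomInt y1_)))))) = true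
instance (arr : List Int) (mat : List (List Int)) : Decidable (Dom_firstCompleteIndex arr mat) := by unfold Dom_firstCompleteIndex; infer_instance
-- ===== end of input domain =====

-- B replaces A's per-step scan-and-remove over all m+n shared lists by an independent
-- per-row/column counter scan of arr, taking the minimum completion index (faster).
-- Equivalence is about the RETURN value only: Python A mutates mat's rows in place, B does not.

-- ===== PORT A =====
-- list.remove(v): drop the first occurrence of v
def pvRemoveFirst (v : Int) : List Int → List Int
  | [] => []
  | x :: xs => if x = v then xs else x :: pvRemoveFirst v xs

-- one pass of A's inner `for j in range(m+n)` loop; none = some list became empty (return i)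
def pvAStep (v : Int) : List (List Int) → Option (List (List Int))
  | [] => some []
  | l :: ls =>
    if v ∈ l then
      let l' := pvRemoveFirst v l
      if l' = [] then none
      else
        match pvAStep v ls with
        | none => none
        | some ls' => some (l' :: ls')
    else
      match pvAStep v ls with
      | none => none
      | some ls' => some (l :: ls')

-- A's outer `for i in range(len(arr))` loop
def pvALoop : List Int → Int → List (List Int) → Int → Int
  | [], _, _, res => res
  | v :: vs, i, target, res =>
    match pvAStep v target with
    | none => i
    | some t' => pvALoop vs (i + 1) t' res

def firstCompleteIndex (arr : List Int) (mat : List (List Int)) : Int :=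
  let m := mat.length
  let n := (PySem.List.pyGetD mat 0 []).length
  let target := mat ++ (List.range n).map (fun j => mat.map (fun row => PySem.List.pyGetD row (j : Int) 0))
  pvALoop arr 0 target ((m : Int) * (n : Int) - 1)

-- ===== PORT B =====
-- need[v] = need.get(v, 0) + 1 loop of Source B
def pvCounter (l : List Int) : PySem.Dict Int Int :=
  l.foldl (fun d v => d.insert v (d.getD v 0 + 1)) PySem.Dict.empty

-- Source B's `for i, v in enumerate(arr)` loop for one row/column; some i = completion index
def pvComplLoop (need : PySem.Dict Int Int) (rem : Int) : List Int → Nat → Option Nat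
  | [], _ => none
  | v :: vs, i =>
    if need.getD v 0 > 0 then
      let need' := need.insert v (need.getD v 0 - 1)
      let rem' := rem - 1
      if rem' = 0 then some i
      else pvComplLoop need' rem' vs (i + 1)
    else pvComplLoop need rem vs (i + 1)

def firstCompleteIndex_alt (arr : List Int) (mat : List (List Int)) : Int :=
  let m := mat.length
  let n := (PySem.List.pyGetD mat 0 []).length
  let lists := mat ++ (List.range n).map (fun j => mat.map (fun row => PySem.List.pyGetD row (j : Int) 0))
  let best := lists.foldl
    (fun best l =>
      match pvComplLoop (pvCounter l) (l.length : Int) arr 0 with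
      | none => best
      | some i =>
        match best with
        | none => some i
        | some b => if i < b then some i else some b) none
  match best with
  | none => (m : Int) * (n : Int) - 1
  | some i => (i : Int)

-- ===== PRECONDITION & SPEC =====
-- Pre_ excludes exactly the inputs where Python A raises IndexError: empty mat (mat[0])
-- and matrices whose some row is shorter than the first row (mat[i][j] for j < len(mat[0])).
def Pre_firstCompleteIndex (arr : List Int) (mat : List (List Int)) : Prop :=
  mat ≠ [] ∧ ∀ row ∈ mat, (mat.headD []).length ≤ row.length
instance (arr : List Int) (mat : List (List Int)) : Decidable (Pre_firstCompleteIndex arr mat) := by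
  unfold Pre_firstCompleteIndex; infer_instance

def pvWitness_firstCompleteIndex : List Int × List (List Int) := ([1, 2, 3, 4], [[1, 4], [2, 3]])

def Spec_firstCompleteIndex (arr : List Int) (mat : List (List Int)) (out : Int) : Prop := out = firstCompleteIndex_alt arr mat
instance (arr : List Int) (mat : List (List Int)) (out : Int) : Decidable (Spec_firstCompleteIndex arr mat out) := by unfold Spec_firstCompleteIndex; infer_instance

-- ===== CLAIM (what is proved, stated in full; the proofs are below) =====
def Claim_equal_firstCompleteIndex : Prop := ∀ (arr : List Int) (mat : List (List Int)), Dom_firstCompleteIndex arr mat → Pre_firstCompleteIndex arr mat → Spec_firstCompleteIndex arr mat (firstCompleteIndex arr mat)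

-- ===== LEMMAS AND PROOFS =====

-- the effect of one A-step on one list
def pvStep1 (v : Int) (l : List Int) : List Int := if v ∈ l then pvRemoveFirst v l else l

-- min of two optional completion indices (none = never completes)
def pvOmin : Option Nat → Option Nat → Option Nat
  | none, b => b
  | some a, none => some a
  | some a, some b => some (min a b)

-- abstract per-list completion index under A's removal semantics
def pvCompl : List Int → List Int → Option Nat
  | [], _ => none
  | v :: vs, l =>
    if v ∈ l ∧ pvRemoveFirst v l = [] then some 0
    else (pvCompl vs (pvStep1 v l)).map (· + 1)

def pvMinCompl (vs : List Int) (ts : List (List Int)) : Option Nat :=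
  ts.foldr (fun l acc => pvOmin (pvCompl vs l) acc) none

theorem pvRemoveFirst_eq_erase (v : Int) (l : List Int) : pvRemoveFirst v l = l.erase v := by
  induction l with
  | nil => rfl
  | cons x xs ih =>
    by_cases h : x = v <;> simp [pvRemoveFirst, h, ih]

theorem pvAStep_cons (v : Int) (l : List Int) (ls : List (List Int)) :
    pvAStep v (l :: ls)
      = if v ∈ l ∧ pvRemoveFirst v l = [] then none
        else (pvAStep v ls).map (fun ls' => pvStep1 v l :: ls') := by
  by_cases hv : v ∈ l
  · by_cases he : pvRemoveFirst v l = []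
    · simp [pvAStep, hv, he]
    · cases hstep : pvAStep v ls <;> simp [pvAStep, hv, he, hstep, pvStep1]
  · cases hstep : pvAStep v ls <;> simp [pvAStep, hv, hstep, pvStep1]

theorem pvAStep_none_iff (v : Int) (ts : List (List Int)) :
    pvAStep v ts = none ↔ ∃ l ∈ ts, v ∈ l ∧ pvRemoveFirst v l = [] := by
  induction ts with
  | nil => simp [pvAStep]
  | cons l ls ih =>
    rw [pvAStep_cons]
    split_ifs with h
    · exact iff_of_true rfl ⟨l, by simp, h⟩
    · rw [Option.map_eq_none_iff, ih]
      constructor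
      · rintro ⟨x, hx, p⟩; exact ⟨x, by simp [hx], p⟩
      · rintro ⟨x, hx, p⟩
        rcases List.mem_cons.mp hx with rfl | hx
        · exact absurd p h
        · exact ⟨x, hx, p⟩

theorem pvAStep_some (v : Int) (ts : List (List Int))
    (h : ¬ ∃ l ∈ ts, v ∈ l ∧ pvRemoveFirst v l = []) :
    pvAStep v ts = some (ts.map (pvStep1 v)) := by
  induction ts with
  | nil => rfl
  | cons l ls ih =>
    have hl : ¬ (v ∈ l ∧ pvRemoveFirst v l = []) := fun hc => h ⟨l, by simp, hc⟩
    have hls : ¬ ∃ l' ∈ ls, v ∈ l' ∧ pvRemoveFirst v l' = [] :=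
      fun ⟨l', hm, hc⟩ => h ⟨l', by simp [hm], hc⟩
    rw [pvAStep_cons, if_neg hl, ih hls]
    rfl

theorem pvOmin_none_right (a : Option Nat) : pvOmin a none = a := by cases a <;> rfl

theorem pvMinCompl_nil (ts : List (List Int)) : pvMinCompl [] ts = none := by
  induction ts with
  | nil => rfl
  | cons l ls ih => simpa [pvMinCompl, pvCompl, pvOmin] using ih

theorem pvFoldr_omin_zero {f : List Int → Option Nat} {ts : List (List Int)}
    (h : ∃ l ∈ ts, f l = some 0) :
    ts.foldr (fun l acc => pvOmin (f l) acc) none = some 0 := by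
  induction ts with
  | nil => simp at h
  | cons l ls ih =>
    rcases h with ⟨x, hx, hfx⟩
    rcases List.mem_cons.mp hx with rfl | hx
    · rw [List.foldr_cons, hfx]
      cases ls.foldr (fun l acc => pvOmin (f l) acc) none <;> simp [pvOmin]
    · rw [List.foldr_cons, ih ⟨x, hx, hfx⟩]
      cases hfl : f l <;> simp [pvOmin]

theorem pvFoldr_omin_map {f g : List Int → Option Nat} {ts : List (List Int)}
    (h : ∀ l ∈ ts, f l = (g l).map (· + 1)) :
    ts.foldr (fun l acc => pvOmin (f l) acc) none
      = (ts.foldr (fun l acc => pvOmin (g l) acc) none).map (· + 1) := by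
  induction ts with
  | nil => rfl
  | cons l ls ih =>
    rw [List.foldr_cons, List.foldr_cons, ih (fun x hx => h x (by simp [hx])),
      h l (by simp)]
    cases g l <;> cases ls.foldr (fun l acc => pvOmin (g l) acc) none <;>
      simp [pvOmin] <;> omega

theorem pvALoop_eq (vs : List Int) (i : Int) (ts : List (List Int)) (res : Int) :
    pvALoop vs i ts res
      = match pvMinCompl vs ts with
        | none => res
        | some k => i + (k : Int) := by
  induction vs generalizing i ts with
  | nil => simp [pvALoop, pvMinCompl_nil]
  | cons v vs ih =>
    by_cases hex : ∃ l ∈ ts, v ∈ l ∧ pvRemoveFirst v l = []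
    · have h0 : pvMinCompl (v :: vs) ts = some 0 := by
        rcases hex with ⟨l, hl, hc⟩
        exact pvFoldr_omin_zero ⟨l, hl, by simp [pvCompl, hc]⟩
      have := (pvAStep_none_iff v ts).mpr hex
      simp [pvALoop, this, h0]
    · have hs := pvAStep_some v ts hex
      have hm : pvMinCompl (v :: vs) ts
          = (pvMinCompl vs (ts.map (pvStep1 v))).map (· + 1) := by
        unfold pvMinCompl
        rw [List.foldr_map]
        exact pvFoldr_omin_map (fun l hl => by
          have : ¬ (v ∈ l ∧ pvRemoveFirst v l = []) := fun hc => hex ⟨l, hl, hc⟩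
          simp [pvCompl, this])
      rw [show pvALoop (v :: vs) i ts res = pvALoop vs (i + 1) (ts.map (pvStep1 v)) res by
        simp [pvALoop, hs]]
      rw [ih, hm]
      cases pvMinCompl vs (ts.map (pvStep1 v)) with
      | none => rfl
      | some k => simp; push_cast; ring

theorem pvCounter_getD (l : List Int) (w : Int) :
    (pvCounter l).getD w 0 = (l.count w : Int) := by
  unfold pvCounter
  rw [PySem.Dict.getD_foldl_insert_add_one]
  simp

theorem pvComplLoop_eq (vs : List Int) (cur : List Int) (i : Nat)
    (need : PySem.Dict Int Int) (rem : Int)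
    (hneed : ∀ w, need.getD w 0 = (cur.count w : Int))
    (hrem : rem = (cur.length : Int)) :
    pvComplLoop need rem vs i = (pvCompl vs cur).map (fun k => i + k) := by
  induction vs generalizing cur need rem i with
  | nil => rfl
  | cons v vs ih =>
    by_cases hv : v ∈ cur
    · have hcnt : 0 < cur.count v := List.count_pos_iff.mpr hv
      have hgt : need.getD v 0 > 0 := by rw [hneed v]; exact_mod_cast hcnt
      have hlen : (pvRemoveFirst v cur).length = cur.length - 1 := by
        rw [pvRemoveFirst_eq_erase, List.length_erase_of_mem hv]
      have hpos : 1 ≤ cur.length := List.length_pos_of_mem hv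
      by_cases he : pvRemoveFirst v cur = []
      · have hr0 : rem - 1 = 0 := by
          have : cur.length = 1 := by
            have := hlen; rw [he] at this; simp at this; omega
          rw [hrem, this]; ring
        simp [pvComplLoop, hgt, hr0, pvCompl, hv, he]
      · have hr0 : rem - 1 ≠ 0 := by
          have : 1 < cur.length := by
            by_contra hc
            have h1 : cur.length = 1 := by omega
            have : (pvRemoveFirst v cur).length = 0 := by rw [hlen, h1]
            exact he (List.length_eq_zero_iff.mp this)
          rw [hrem]; omega
        have hstep : pvComplLoop need rem (v :: vs) i
            = pvComplLoop (need.insert v (need.getD v 0 - 1)) (rem - 1) vs (i + 1) := by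
          simp [pvComplLoop, hgt, hr0]
        rw [hstep, ih (pvRemoveFirst v cur) (i + 1) _ _ ?_ ?_]
        · have : pvCompl (v :: vs) cur = (pvCompl vs (pvRemoveFirst v cur)).map (· + 1) := by
            simp [pvCompl, hv, he, pvStep1]
          rw [this]
          cases pvCompl vs (pvRemoveFirst v cur) <;> simp <;> omega
        · intro w
          rw [PySem.Dict.getD_insert]
          by_cases hw : w = v
          · subst hw
            rw [if_pos rfl, hneed, pvRemoveFirst_eq_erase, List.count_erase_self]
            push_cast [hcnt]
            omega
          · rw [if_neg hw, hneed, pvRemoveFirst_eq_erase, List.count_erase_of_ne hw]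
        · rw [hrem, hlen]; push_cast [hpos]; omega
    · have hcnt : cur.count v = 0 := List.count_eq_zero.mpr hv
      have hng : ¬ need.getD v 0 > 0 := by rw [hneed v, hcnt]; simp
      have hstep : pvComplLoop need rem (v :: vs) i = pvComplLoop need rem vs (i + 1) := by
        simp [pvComplLoop, hng]
      rw [hstep, ih cur (i + 1) need rem hneed hrem]
      have : pvCompl (v :: vs) cur = (pvCompl vs cur).map (· + 1) := by
        simp [pvCompl, hv, pvStep1]
      rw [this]
      cases pvCompl vs cur <;> simp <;> omega

theorem pvBStep_eq_omin (best : Option Nat) (o : Option Nat) :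
    (match o with
     | none => best
     | some i =>
       match best with
       | none => some i
       | some b => if i < b then some i else some b) = pvOmin o best := by
  cases o with
  | none => rfl
  | some i =>
    cases best with
    | none => rfl
    | some b =>
      simp [pvOmin, Nat.min_def]
      split_ifs <;> simp <;> omega

theorem pvOmin_assoc (a b c : Option Nat) : pvOmin (pvOmin a b) c = pvOmin a (pvOmin b c) := by
  cases a <;> cases b <;> cases c <;> simp [pvOmin, Nat.min_assoc]

theorem pvOmin_left_comm (a b c : Option Nat) : pvOmin a (pvOmin b c) = pvOmin b (pvOmin a c) := by
  cases a <;> cases b <;> cases c <;> simp [pvOmin] <;> omega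

theorem pvFoldl_omin (f : List Int → Option Nat) (ts : List (List Int)) (acc : Option Nat) :
    ts.foldl (fun best l => pvOmin (f l) best) acc
      = pvOmin (ts.foldr (fun l a => pvOmin (f l) a) none) acc := by
  induction ts generalizing acc with
  | nil => simp [pvOmin]
  | cons l ls ih =>
    rw [List.foldl_cons, List.foldr_cons, ih (pvOmin (f l) acc)]
    rw [pvOmin_assoc]
    exact pvOmin_left_comm _ _ _

-- ===== VERDICT (by name: the statement is the Claim_ definition above) =====
theorem firstCompleteIndex_spec : Claim_equal_firstCompleteIndex := by
  intro arr mat _ _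
  unfold Spec_firstCompleteIndex firstCompleteIndex firstCompleteIndex_alt
  simp only []
  set n := (PySem.List.pyGetD mat 0 []).length with hn
  set lists := mat ++ (List.range n).map (fun j => mat.map (fun row => PySem.List.pyGetD row (j : Int) 0)) with hlists
  have hf : ∀ l, pvComplLoop (pvCounter l) (l.length : Int) arr 0 = pvCompl arr l := by
    intro l
    rw [pvComplLoop_eq arr l 0 _ _ (pvCounter_getD l) rfl]
    cases pvCompl arr l <;> simp
  have hfold : lists.foldl
      (fun best l =>
        match pvComplLoop (pvCounter l) (l.length : Int) arr 0 with
        | none => best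
        | some i =>
          match best with
          | none => some i
          | some b => if i < b then some i else some b) none
      = pvMinCompl arr lists := by
    have : ∀ (ts : List (List Int)) (acc : Option Nat), ts.foldl
        (fun best l =>
          match pvComplLoop (pvCounter l) (l.length : Int) arr 0 with
          | none => best
          | some i =>
            match best with
            | none => some i
            | some b => if i < b then some i else some b) acc
        = ts.foldl (fun best l => pvOmin (pvCompl arr l) best) acc := by
      intro ts
      induction ts with
      | nil => intro acc; rfl
      | cons l ls ih =>
        intro acc
        rw [List.foldl_cons, List.foldl_cons, ih, hf l, pvBStep_eq_omin]
    rw [this lists none, pvFoldl_omin, pvOmin_none_right]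
    rfl
  rw [hfold, pvALoop_eq]
  cases pvMinCompl arr lists with
  | none => rfl
  | some k => simp
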